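-- pv_equiv track=rewrite | github.com/JasonZhanTHU/ProjectEcon | Location/fields/common.py | separate_by_capital_letters
-- ===== SOURCE A (Python) =====
-- def separate_by_capital_letters(string):
--     separated_set = []
--     separated_string = ""
--     last = "a"
--     for char in string:
--         if char == ' ' and last == ' ':
--             continue
--         if (char.isupper() and separated_string and (('z' >= last >= 'a') or last == ' ')) \
--                 or char == '.' or char == ',' or char == '-' or char == '(' or char == ')':
--             if separated_string != '':
--                 separated_set.append(separated_string)
--             separated_string = ""
--         elif char.isupper() == 0 and last == ' ' and separated_string != '':
--             separated_set.append(separated_string)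
--             separated_string = ""
--         if char != '(' and char != ')' and char != '.' and char != ' ' and char != ',' and char != '-' and char != '(' and char != ')':
--             separated_string += char
--         last = char
--     if separated_string:
--         separated_set.append(separated_string)
--     return separated_set
-- ===== SOURCE B (Python) =====
-- def separate_by_capital_letters(string):
--     # One pass emitting a separator-marked stream, then split once at the end.
--     out = []
--     prev = ' '
--     for char in string:
--         if char in ' .,-()':
--             out.append('\x00')
--         elif char.isupper() and 'a' <= prev <= 'z':
--             out.append('\x00')
--             out.append(char)
--         else:
--             out.append(char)
--         prev = char
--     return [t for t in ''.join(out).split('\x00') if t]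
-- ===== Notes on version B (the rewrite author's own statement) =====
-- stated objective: faster
-- what changed: Replaces A's stateful flush-accumulator loop (pending token string, last-char state, three flush branches, skip rule) by a single pass that emits a separator-marked character stream, followed by one join+split on the separator discarding empty tokens.
import Mathlib
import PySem

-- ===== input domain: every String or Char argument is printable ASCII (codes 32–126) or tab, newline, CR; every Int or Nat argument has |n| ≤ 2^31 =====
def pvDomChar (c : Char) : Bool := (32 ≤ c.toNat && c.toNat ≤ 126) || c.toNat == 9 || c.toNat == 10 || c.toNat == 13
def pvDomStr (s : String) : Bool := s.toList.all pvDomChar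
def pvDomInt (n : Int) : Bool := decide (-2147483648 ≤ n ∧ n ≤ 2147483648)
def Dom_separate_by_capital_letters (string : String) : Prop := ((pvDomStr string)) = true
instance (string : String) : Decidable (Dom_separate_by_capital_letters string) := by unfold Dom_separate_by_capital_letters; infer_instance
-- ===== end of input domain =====

-- B replaces A's stateful flush-accumulator loop by a single separator-emitting pass
-- followed by one join+split; objective: faster by a constant factor (no per-char str += rebuilds).

-- ===== PORT A =====
-- state: (separated_set, separated_string as List Char, last); one Python loop iteration
def sbclStep (st : List String × List Char × Char) (char : Char) : List String × List Char × Char :=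
  let acc := st.1
  let cur := st.2.1
  let last := st.2.2
  if char = ' ' ∧ last = ' ' then st
  else
    let p1 : List String × List Char :=
      if (PySem.Chars.isupper char ∧ cur ≠ [] ∧ (('a' ≤ last ∧ last ≤ 'z') ∨ last = ' '))
          ∨ char = '.' ∨ char = ',' ∨ char = '-' ∨ char = '(' ∨ char = ')' then
        (if cur ≠ [] then acc ++ [String.ofList cur] else acc, [])
      else if (¬ PySem.Chars.isupper char = true) ∧ last = ' ' ∧ cur ≠ [] then
        (acc ++ [String.ofList cur], [])
      else (acc, cur)
    let cur2 := if char ≠ '(' ∧ char ≠ ')' ∧ char ≠ '.' ∧ char ≠ ' ' ∧ char ≠ ',' ∧ char ≠ '-' then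
        p1.2 ++ [char] else p1.2
    (p1.1, cur2, char)

def separate_by_capital_letters (string : String) : List String :=
  let st := string.toList.foldl sbclStep ([], [], 'a')
  if st.2.1 ≠ [] then st.1 ++ [String.ofList st.2.1] else st.1

-- ===== PORT B =====
-- chars emitted for one input char, given the previous raw char
def sbclEmit (prev char : Char) : List Char :=
  if char = ' ' ∨ char = '.' ∨ char = ',' ∨ char = '-' ∨ char = '(' ∨ char = ')' then ['\x00']
  else if PySem.Chars.isupper char ∧ ('a' ≤ prev ∧ prev ≤ 'z') then ['\x00', char]
  else [char]

-- the loop over the string, threading prev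
def sbclEmitAll (prev : Char) : List Char → List Char
  | [] => []
  | c :: rest => sbclEmit prev c ++ sbclEmitAll c rest

-- List.splitOn on the single separator char is exact for Python's str.split('\x00')
def separate_by_capital_letters_alt (string : String) : List String :=
  (((sbclEmitAll ' ' string.toList).splitOn '\x00').map String.ofList).filter (fun t => t ≠ "")

-- ===== PRECONDITION & SPEC =====
def Spec_separate_by_capital_letters (string : String) (out : List String) : Prop := out = separate_by_capital_letters_alt string
instance (string : String) (out : List String) : Decidable (Spec_separate_by_capital_letters string out) := by unfold Spec_separate_by_capital_letters; infer_instance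

-- ===== CLAIM (what is proved, stated in full; the proofs are below) =====
def Claim_equal_separate_by_capital_letters : Prop := ∀ (string : String), Dom_separate_by_capital_letters string → Spec_separate_by_capital_letters string (separate_by_capital_letters string)

-- ===== LEMMAS AND PROOFS =====

-- token list of a separator-marked char stream
def sbclTok (l : List Char) : List String :=
  ((l.splitOn '\x00').filter (fun t => t ≠ [])).map String.ofList

def sbclTokOne (a : List Char) : List String :=
  if a = [] then [] else [String.ofList a]

-- A's flush of the pending accumulator
def sbclFin (st : List String × List Char × Char) : List String :=
  if st.2.1 ≠ [] then st.1 ++ [String.ofList st.2.1] else st.1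

lemma sbcl_ofList_ne_empty (a : List Char) (h : a ≠ []) : String.ofList a ≠ "" := by
  intro hc
  exact h (by simpa using congrArg String.toList hc)

lemma sbcl_alt_eq_tok (s : String) :
    separate_by_capital_letters_alt s = sbclTok (sbclEmitAll ' ' s.toList) := by
  simp only [separate_by_capital_letters_alt, sbclTok]
  induction (sbclEmitAll ' ' s.toList).splitOn '\x00' with
  | nil => rfl
  | cons a l ih =>
      by_cases ha : a = []
      · subst ha; simpa using ih
      · simpa [ha, sbcl_ofList_ne_empty a ha] using ih

lemma sbcl_splitOn_nulfree (a : List Char) (h : '\x00' ∉ a) :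
    a.splitOn '\x00' = [a] := by
  induction a with
  | nil => rfl
  | cons c a ih =>
      have hc : c ≠ '\x00' := fun hh => h (by simp [hh])
      have ha : '\x00' ∉ a := fun hh => h (by simp [hh])
      simp only [List.splitOn] at ih ⊢
      simp [List.splitOnP_cons, hc, ih ha]

lemma sbcl_splitOn_append (a l : List Char) (h : '\x00' ∉ a) :
    (a ++ '\x00' :: l).splitOn '\x00' = a :: l.splitOn '\x00' := by
  induction a with
  | nil => simp [List.splitOn, List.splitOnP_cons]
  | cons c a ih =>
      have hc : c ≠ '\x00' := fun hh => h (by simp [hh])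
      have ha : '\x00' ∉ a := fun hh => h (by simp [hh])
      simp only [List.splitOn, List.splitOnP_cons, List.cons_append] at *
      simp [hc, ih ha]

lemma sbcl_tok_nulfree (a : List Char) (h : '\x00' ∉ a) : sbclTok a = sbclTokOne a := by
  by_cases ha : a = []
  · subst ha; rfl
  · simp [sbclTok, sbclTokOne, sbcl_splitOn_nulfree a h, ha]

lemma sbcl_tok_append (a l : List Char) (h : '\x00' ∉ a) :
    sbclTok (a ++ '\x00' :: l) = sbclTokOne a ++ sbclTok l := by
  by_cases ha : a = []
  · subst ha; simp [sbclTok, sbclTokOne, List.splitOn, List.splitOnP_cons]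
  · simp [sbclTok, sbclTokOne, sbcl_splitOn_append a l h, ha]

lemma sbcl_tok_nul (l : List Char) : sbclTok ('\x00' :: l) = sbclTok l := by
  simpa using sbcl_tok_append [] l (by simp)

lemma sbclTok_nil : sbclTok [] = [] := rfl

-- the extra separator B has already emitted when A's loop sits after a space with a pending token
def sbclPad (prev : Char) (cur : List Char) : List Char :=
  if prev = ' ' ∧ cur ≠ [] then ['\x00'] else []

lemma sbcl_tok_pad (prev : Char) (cur l : List Char) (hcur : '\x00' ∉ cur) :
    sbclTok (cur ++ sbclPad prev cur ++ '\x00' :: l) = sbclTokOne cur ++ sbclTok l := by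
  by_cases h : prev = ' ' ∧ cur ≠ []
  · have : cur ++ sbclPad prev cur ++ '\x00' :: l = cur ++ '\x00' :: ('\x00' :: l) := by
      simp [sbclPad, h]
    rw [this, sbcl_tok_append cur _ hcur, sbcl_tok_nul]
  · have : cur ++ sbclPad prev cur ++ '\x00' :: l = cur ++ '\x00' :: l := by
      simp [sbclPad, h]
    rw [this, sbcl_tok_append cur _ hcur]

lemma sbcl_dom_ne_nul (c : Char) (h : pvDomChar c = true) : c ≠ '\x00' := by
  intro hc; subst hc; simp [pvDomChar] at h

-- main invariant: A's loop + final flush = tokens of (pending ++ pad ++ B's emission)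
lemma sbcl_inv (rest : List Char) :
    ∀ (acc : List String) (cur : List Char) (prev : Char),
      rest.all pvDomChar → '\x00' ∉ cur →
      sbclFin (rest.foldl sbclStep (acc, cur, prev)) =
        acc ++ sbclTok (cur ++ sbclPad prev cur ++ sbclEmitAll prev rest) := by
  induction rest with
  | nil =>
      intro acc cur prev _ hcur
      by_cases hc : cur = []
      · subst hc; simp [sbclFin, sbclPad, sbclEmitAll, sbclTok_nil]
      · by_cases hp : prev = ' '
        · simpa [sbclFin, sbclPad, hc, hp, sbclEmitAll, sbclTokOne, sbclTok_nil] using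
            (sbcl_tok_append cur [] hcur).symm
        · simpa [sbclFin, sbclPad, hc, hp, sbclEmitAll, sbclTokOne] using
            (sbcl_tok_nulfree cur hcur).symm
  | cons c rest ih =>
      intro acc cur prev hdom hcur
      have hcd : pvDomChar c = true := by simp [List.all_cons] at hdom; exact hdom.1
      have hrd : rest.all pvDomChar = true := by simp [List.all_cons] at hdom; simpa using hdom.2
      have hcnul : c ≠ '\x00' := sbcl_dom_ne_nul c hcd
      rw [List.foldl_cons]
      by_cases hsp : c = ' '
      · subst hsp
        by_cases hp : prev = ' '
        · -- skipped double space
          subst hp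
          have hstep : sbclStep (acc, cur, ' ') ' ' = (acc, cur, ' ') := by simp [sbclStep]
          rw [hstep, ih acc cur ' ' hrd hcur]
          have hemit : sbclEmitAll ' ' (' ' :: rest) = '\x00' :: sbclEmitAll ' ' rest := by
            simp [sbclEmitAll, sbclEmit]
          rw [hemit]
          by_cases hc0 : cur = []
          · subst hc0; simp [sbclPad, sbcl_tok_nul]
          · have h1 : cur ++ sbclPad ' ' cur ++ sbclEmitAll ' ' rest
                = cur ++ '\x00' :: sbclEmitAll ' ' rest := by simp [sbclPad, hc0]
            have h2 : cur ++ sbclPad ' ' cur ++ '\x00' :: sbclEmitAll ' ' rest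
                = cur ++ '\x00' :: ('\x00' :: sbclEmitAll ' ' rest) := by simp [sbclPad, hc0]
            rw [h1, h2, sbcl_tok_append cur _ hcur, sbcl_tok_append cur _ hcur, sbcl_tok_nul]
        · -- single space: no flush yet
          have hstep : sbclStep (acc, cur, prev) ' ' = (acc, cur, ' ') := by
            simp [sbclStep, hp, (by decide : PySem.Chars.isupper ' ' = false)]
          rw [hstep, ih acc cur ' ' hrd hcur]
          have hemit : sbclEmitAll prev (' ' :: rest) = '\x00' :: sbclEmitAll ' ' rest := by
            simp [sbclEmitAll, sbclEmit]
          rw [hemit]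
          by_cases hc0 : cur = []
          · subst hc0; simp [sbclPad, sbcl_tok_nul]
          · have h1 : cur ++ sbclPad ' ' cur ++ sbclEmitAll ' ' rest
                = cur ++ '\x00' :: sbclEmitAll ' ' rest := by simp [sbclPad, hc0]
            rw [h1, sbcl_tok_append cur _ hcur, sbcl_tok_pad prev cur _ hcur]
      · by_cases hpc : c = '.' ∨ c = ',' ∨ c = '-' ∨ c = '(' ∨ c = ')'
        · -- punctuation: flush, drop char
          have hemit : sbclEmitAll prev (c :: rest) = '\x00' :: sbclEmitAll c rest := by
            simp [sbclEmitAll, sbclEmit, hpc]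
          rw [hemit]
          by_cases hc0 : cur = []
          · have hstep : sbclStep (acc, cur, prev) c = (acc, [], c) := by
              subst hc0; rcases hpc with h|h|h|h|h <;> subst h <;> simp [sbclStep]
            rw [hstep, ih acc [] c hrd (by simp)]
            simp [hc0, sbclPad, sbcl_tok_nul]
          · have hstep : sbclStep (acc, cur, prev) c = (acc ++ [String.ofList cur], [], c) := by
              rcases hpc with h|h|h|h|h <;> subst h <;> simp [sbclStep, hc0]
            rw [hstep, ih _ [] c hrd (by simp)]
            rw [show cur ++ sbclPad prev cur ++ '\x00' :: sbclEmitAll c rest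
                  = cur ++ sbclPad prev cur ++ '\x00' :: ([] ++ sbclEmitAll c rest) by simp,
                sbcl_tok_pad prev cur _ hcur]
            simp [sbclPad, sbclTokOne, hc0]
        · -- regular character
          push Not at hpc
          obtain ⟨h1, h2, h3, h4, h5⟩ := hpc
          have hemitn : ∀ p, ¬ (PySem.Chars.isupper c = true ∧ ('a' ≤ p ∧ p ≤ 'z')) →
              sbclEmitAll p (c :: rest) = c :: sbclEmitAll c rest := by
            intro p hn
            simp [sbclEmitAll, sbclEmit, hsp, h1, h2, h3, h4, h5, hn]
          have hemity : ∀ p, (PySem.Chars.isupper c = true ∧ ('a' ≤ p ∧ p ≤ 'z')) →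
              sbclEmitAll p (c :: rest) = '\x00' :: c :: sbclEmitAll c rest := by
            intro p hy
            simp [sbclEmitAll, sbclEmit, hsp, h1, h2, h3, h4, h5, hy]
          have hcc : '\x00' ∉ [c] := by simp; exact fun h => hcnul h.symm
          by_cases hc0 : cur = []
          · subst hc0
            have hstep : sbclStep (acc, [], prev) c = (acc, [c], c) := by
              simp [sbclStep, hsp, h1, h2, h3, h4, h5]
            rw [hstep, ih acc [c] c hrd hcc]
            have hpadc : sbclPad c [c] = [] := by simp [sbclPad, hsp]
            by_cases hm : PySem.Chars.isupper c = true ∧ ('a' ≤ prev ∧ prev ≤ 'z')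
            · rw [hemity prev hm]; simp [sbclPad, hsp, sbcl_tok_nul]
            · rw [hemitn prev hm]; simp [sbclPad, hsp]
          · by_cases hfl : (('a' ≤ prev ∧ prev ≤ 'z') ∧ PySem.Chars.isupper c = true) ∨ prev = ' '
            · -- flush before this char
              have hstep : sbclStep (acc, cur, prev) c = (acc ++ [String.ofList cur], [c], c) := by
                rcases hfl with ⟨hlo, hup⟩ | hpsp
                · simp [sbclStep, hsp, h1, h2, h3, h4, h5, hlo, hup, hc0]
                · subst hpsp
                  by_cases hup : PySem.Chars.isupper c = true
                  · simp [sbclStep, hsp, h1, h2, h3, h4, h5, hup, hc0]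
                  · simp [sbclStep, hsp, h1, h2, h3, h4, h5, hup, hc0]
              rw [hstep, ih _ [c] c hrd hcc]
              have hgoal : cur ++ sbclPad prev cur ++ sbclEmitAll prev (c :: rest)
                  = cur ++ '\x00' :: (c :: sbclEmitAll c rest) := by
                by_cases hm : PySem.Chars.isupper c = true ∧ ('a' ≤ prev ∧ prev ≤ 'z')
                · have hpp : ¬ prev = ' ' := by
                    rintro rfl; exact absurd hm.2.1 (by decide)
                  rw [hemity prev hm]; simp [sbclPad, hpp]
                · have hpsp : prev = ' ' := by
                    rcases hfl with ⟨hlo, hup⟩ | hpsp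
                    · exact absurd ⟨hup, hlo⟩ hm
                    · exact hpsp
                  subst hpsp
                  rw [hemitn ' ' hm]; simp [sbclPad, hc0]
              rw [hgoal, sbcl_tok_append cur _ hcur]
              simp [sbclPad, hsp, sbclTokOne, hc0]
            · -- no boundary: extend the pending token
              push Not at hfl
              obtain ⟨hnm, hpp⟩ := hfl
              have hstep : sbclStep (acc, cur, prev) c = (acc, cur ++ [c], c) := by
                by_cases hup : PySem.Chars.isupper c = true
                · have hlo : ¬ ('a' ≤ prev ∧ prev ≤ 'z') := fun hl => (hnm hl) hup
                  simp [sbclStep, hsp, h1, h2, h3, h4, h5, hup, hlo, hpp]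
                · simp [sbclStep, hsp, h1, h2, h3, h4, h5, hup, hpp]
              have hcurc : '\x00' ∉ cur ++ [c] := by
                simp [hcur]; exact fun h => hcnul h.symm
              rw [hstep, ih acc (cur ++ [c]) c hrd hcurc]
              have hm : ¬ (PySem.Chars.isupper c = true ∧ ('a' ≤ prev ∧ prev ≤ 'z')) := by
                rintro ⟨hup, hlo⟩; exact (hnm hlo) hup
              rw [hemitn prev hm]
              simp [sbclPad, hsp, hpp]

-- first step: aligns A's initial last = 'a' with B's initial prev = ' '
lemma sbcl_main (s : List Char) (hdom : s.all pvDomChar = true) :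
    sbclFin (s.foldl sbclStep ([], [], 'a')) = sbclTok (sbclEmitAll ' ' s) := by
  cases s with
  | nil => rfl
  | cons c rest =>
      have hcd : pvDomChar c = true := by simp [List.all_cons] at hdom; exact hdom.1
      have hrd : rest.all pvDomChar = true := by simp [List.all_cons] at hdom; simpa using hdom.2
      have hcnul : c ≠ '\x00' := sbcl_dom_ne_nul c hcd
      by_cases hsp : c = ' '
      · subst hsp
        rw [List.foldl_cons]
        have hstep : sbclStep ([], [], 'a') ' ' = ([], [], ' ') := by decide
        rw [hstep, sbcl_inv rest [] [] ' ' hrd (by simp)]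
        simp [sbclEmitAll, sbclEmit, sbclPad, sbcl_tok_nul]
      · by_cases hpc : c = '.' ∨ c = ',' ∨ c = '-' ∨ c = '(' ∨ c = ')'
        · have hstep : sbclStep ([], [], 'a') c = ([], [], c) := by
            rcases hpc with h|h|h|h|h <;> subst h <;> decide
          rw [List.foldl_cons, hstep, sbcl_inv rest [] [] c hrd (by simp)]
          have hemit : sbclEmit ' ' c = ['\x00'] := by
            simp [sbclEmit, hpc]
          simp [sbclEmitAll, hemit, sbclPad, sbcl_tok_nul]
        · push Not at hpc
          obtain ⟨h1, h2, h3, h4, h5⟩ := hpc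
          have hstep : sbclStep ([], [], 'a') c = ([], [c], c) := by
            simp [sbclStep, hsp, h1, h2, h3, h4, h5]
          rw [List.foldl_cons, hstep, sbcl_inv rest [] [c] c hrd (by simp; exact fun h => hcnul h.symm)]
          have hemit : sbclEmit ' ' c = [c] := by
            simp only [sbclEmit, if_neg (by tauto : ¬(c = ' ' ∨ c = '.' ∨ c = ',' ∨ c = '-' ∨ c = '(' ∨ c = ')'))]
            rw [if_neg]; rintro ⟨-, hle, -⟩; exact absurd hle (by decide)
          simp [sbclEmitAll, hemit, sbclPad, hsp]

-- ===== VERDICT (by name: the statement is the Claim_ definition above) =====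
theorem separate_by_capital_letters_spec : Claim_equal_separate_by_capital_letters := by
  intro s hdom
  unfold Spec_separate_by_capital_letters
  rw [sbcl_alt_eq_tok]
  have hd : s.toList.all pvDomChar = true := hdom
  simpa [separate_by_capital_letters, sbclFin] using sbcl_main s.toList hd
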